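-- pv_equiv track=rewrite | github.com/ivy-llc/ivy | ivy/functional/frontends/torch/nn/functional/vision_functions.py | _handle_padding_shape
-- ===== SOURCE A (Python) =====
-- def _handle_padding_shape(padding, n, mode):
--     padding = tuple(
--         [
--             (padding[i * 2], padding[i * 2 + 1])
--             for i in range(int(len(padding) / 2) - 1, -1, -1)
--         ]
--     )
--     while len(padding) < n:
--         if mode == "circular":
--             padding = padding + ((0, 0),)
--         else:
--             padding = ((0, 0),) + padding
--     if mode == "circular":
--         padding = tuple(list(padding)[::-1])
--     return padding
-- ===== SOURCE B (Python) =====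
-- def _handle_padding_shape(padding, n, mode):
--     pairs = [(padding[2 * i], padding[2 * i + 1]) for i in range(len(padding) // 2)]
--     if mode != "circular":
--         pairs.reverse()
--     return tuple([(0, 0)] * max(n - len(pairs), 0) + pairs)
-- ===== Notes on version B (the rewrite author's own statement) =====
-- stated objective: simpler
-- what changed: Builds forward dim pairs once, branches on mode a single time to decide direction (the original's post-reversal collapses: circular keeps forward order, non-circular reverses), and replaces the one-at-a-time while-loop padding with a single computed count of (0,0) prefixes.
import Mathlib
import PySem

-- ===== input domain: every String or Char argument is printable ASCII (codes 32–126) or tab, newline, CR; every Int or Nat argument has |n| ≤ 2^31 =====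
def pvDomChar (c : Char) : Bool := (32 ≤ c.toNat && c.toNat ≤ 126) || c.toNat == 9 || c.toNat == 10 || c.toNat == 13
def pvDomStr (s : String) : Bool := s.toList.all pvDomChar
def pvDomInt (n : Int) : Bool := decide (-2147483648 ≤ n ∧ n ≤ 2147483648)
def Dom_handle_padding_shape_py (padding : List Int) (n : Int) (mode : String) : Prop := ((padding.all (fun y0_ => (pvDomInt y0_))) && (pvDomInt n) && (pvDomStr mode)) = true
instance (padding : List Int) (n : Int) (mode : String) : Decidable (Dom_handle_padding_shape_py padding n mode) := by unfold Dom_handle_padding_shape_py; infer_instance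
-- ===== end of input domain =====

-- B replaces A's reversed comprehension + one-at-a-time while-loop padding + conditional post-reversal
-- by forward pairs, one direction branch, and a single computed count of (0,0) prefixes (objective: simpler).

-- ===== PORT A =====
-- the while loop: grows padding by one pair until its length reaches n; fuel = (n - len p)⁺, exactly
-- one unit per iteration the Python loop performs, with the guard re-checked each step
def pvALoop (mode : String) (n : Int) : Nat → List (Int × Int) → List (Int × Int)
  | 0, p => p
  | fuel + 1, p =>
    if (p.length : Int) < n then
      if mode == "circular" then pvALoop mode n fuel (p ++ [((0 : Int), (0 : Int))])
      else pvALoop mode n fuel (((0 : Int), (0 : Int)) :: p)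
    else p

def handle_padding_shape_py (padding : List Int) (n : Int) (mode : String) : List (Int × Int) :=
  -- int(len(padding)/2) = floor division (length is nonnegative, so exact);
  -- indices i*2, i*2+1 are always in range, so the pyGetD default is never used; [::-1] = List.reverse (exact)
  let p := (PySem.List.pyRange (PySem.Int.floordiv (padding.length) 2 - 1) (-1) (-1)).map
      (fun i => (PySem.List.pyGetD padding (i * 2) 0, PySem.List.pyGetD padding (i * 2 + 1) 0))
  let p := pvALoop mode n (n - p.length).toNat p
  if mode == "circular" then p.reverse else p

-- ===== PORT B =====
def handle_padding_shape_py_alt (padding : List Int) (n : Int) (mode : String) : List (Int × Int) :=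
  let pairs := (List.range (padding.length / 2)).map
      (fun i => (PySem.List.pyGetD padding ((2 * i : Nat) : Int) 0, PySem.List.pyGetD padding ((2 * i + 1 : Nat) : Int) 0))
  let pairs := if mode != "circular" then pairs.reverse else pairs
  -- [(0,0)] * max(n - len(pairs), 0) ++ pairs : Int.toNat is exactly max(·, 0)
  List.replicate (n - pairs.length).toNat ((0 : Int), (0 : Int)) ++ pairs

-- ===== PRECONDITION & SPEC =====
def Spec_handle_padding_shape_py (padding : List Int) (n : Int) (mode : String) (out : List (Int × Int)) : Prop := out = handle_padding_shape_py_alt padding n mode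
instance (padding : List Int) (n : Int) (mode : String) (out : List (Int × Int)) : Decidable (Spec_handle_padding_shape_py padding n mode out) := by unfold Spec_handle_padding_shape_py; infer_instance

-- ===== CLAIM (what is proved, stated in full; the proofs are below) =====
def Claim_equal_handle_padding_shape_py : Prop := ∀ (padding : List Int) (n : Int) (mode : String), Dom_handle_padding_shape_py padding n mode → Spec_handle_padding_shape_py padding n mode (handle_padding_shape_py padding n mode)

-- ===== LEMMAS AND PROOFS =====

-- the while loop puts exactly (n - len p)⁺ zero pairs at the back (circular) / front (otherwise)
theorem pvALoop_circ (n : Int) (fuel : Nat) (p : List (Int × Int))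
    (hf : (n - p.length).toNat ≤ fuel) :
    pvALoop "circular" n fuel p = p ++ List.replicate (n - p.length).toNat ((0 : Int), (0 : Int)) := by
  induction fuel generalizing p with
  | zero =>
    have : (n - (p.length : Int)).toNat = 0 := by omega
    simp [pvALoop, this]
  | succ fuel ih =>
    rw [pvALoop]
    split
    · rename_i h
      simp only [beq_self_eq_true, if_true]
      rw [ih (p ++ [((0 : Int), (0 : Int))]) (by simp; omega)]
      have hk : (n - (p.length : Int)).toNat = (n - ((p.length : Int) + 1)).toNat + 1 := by omega
      simp only [List.length_append, List.length_singleton, Nat.cast_add, Nat.cast_one,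
        List.append_assoc, List.singleton_append]
      rw [hk, List.replicate_succ]
    · rename_i h
      have : (n - (p.length : Int)).toNat = 0 := by omega
      simp [this]

theorem pvALoop_noncirc (mode : String) (n : Int) (fuel : Nat) (p : List (Int × Int))
    (hm : (mode == "circular") = false) (hf : (n - p.length).toNat ≤ fuel) :
    pvALoop mode n fuel p = List.replicate (n - p.length).toNat ((0 : Int), (0 : Int)) ++ p := by
  induction fuel generalizing p with
  | zero =>
    have : (n - (p.length : Int)).toNat = 0 := by omega
    simp [pvALoop, this]
  | succ fuel ih =>
    rw [pvALoop, hm]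
    simp only [Bool.false_eq_true, if_false]
    split
    · rename_i h
      rw [ih (((0 : Int), (0 : Int)) :: p) (by simp; omega)]
      have hk : (n - (p.length : Int)).toNat = (n - ((p.length : Int) + 1)).toNat + 1 := by omega
      simp only [List.length_cons, Nat.cast_add, Nat.cast_one]
      rw [hk, List.replicate_succ, ← List.singleton_append, ← List.append_assoc,
        ← List.replicate_succ', List.replicate_succ, List.cons_append]
    · rename_i h
      have : (n - (p.length : Int)).toNat = 0 := by omega
      simp [this]

-- A's reversed comprehension = reverse of B's forward pair list
theorem pvPairsA_eq (padding : List Int) :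
    (PySem.List.pyRange (PySem.Int.floordiv (padding.length) 2 - 1) (-1) (-1)).map
        (fun i => (PySem.List.pyGetD padding (i * 2) 0, PySem.List.pyGetD padding (i * 2 + 1) 0))
      = ((List.range (padding.length / 2)).map
          (fun i => (PySem.List.pyGetD padding ((2 * i : Nat) : Int) 0,
                     PySem.List.pyGetD padding ((2 * i + 1 : Nat) : Int) 0))).reverse := by
  have hm : PySem.Int.floordiv ((padding.length : Int)) 2 = ((padding.length / 2 : Nat) : Int) :=
    PySem.Int.floordiv_natCast _ 2
  rw [hm, PySem.List.pyRange_neg_one_eq_reverse, List.map_reverse]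
  congr 1
  rw [show (-1 + 1 : Int) = 0 by norm_num,
    show ((padding.length / 2 : Nat) : Int) - 1 + 1 = ((padding.length / 2 : Nat) : Int) by ring,
    PySem.List.pyRange_zero_natCast, List.map_map]
  apply List.map_congr_left
  intro i _
  simp only [Function.comp_apply]
  congr 1 <;> · congr 1; push_cast; ring

-- ===== VERDICT (by name: the statement is the Claim_ definition above) =====
theorem handle_padding_shape_py_spec : Claim_equal_handle_padding_shape_py := by
  intro padding n mode _
  unfold Spec_handle_padding_shape_py handle_padding_shape_py handle_padding_shape_py_alt
  simp only [pvPairsA_eq]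
  by_cases hm : mode = "circular"
  · subst hm
    rw [pvALoop_circ n _ _ le_rfl]
    simp [List.reverse_append, List.reverse_replicate]
  · have hb : (mode == "circular") = false := by simp [hm]
    rw [pvALoop_noncirc mode n _ _ hb le_rfl]
    simp [hb, bne]
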